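-- pv_equiv track=rewrite | github.com/Serlthree/TeekoAI | game_2ai.py | count
-- ===== SOURCE A (Python) =====
-- def count(state, piece):
--     """ Counts the number of pieces of a certain color on the board
--     """
--     max_cnt = 0
--     #check horizontal counts
--     for row in state:
--         for i in range(2):
--             cnt = 0
--             for j in range(4):
--                 if row[i+j] == piece:
--                     cnt += 1
--                 elif row[i+j] != ' ':
--                     cnt = 0
--                     break
--             if cnt > max_cnt:
--                 max_cnt = cnt
--     #check vertical counts
--     for col in range(5):
--         for i in range(2):
--             cnt = 0
--             for j in range(4):
--                 if state[i+j][col] == piece: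
--                     cnt += 1
--                 elif state[i+j][col] != ' ':
--                     cnt = 0
--                     break
--             if cnt > max_cnt:
--                 max_cnt = cnt
--     #check \ diagonal counts
--     for i in range(2):
--         for j in range(2):
--             cnt = 0
--             for k in range(4):
--                 if state[i+k][j+k] == piece:
--                     cnt += 1
--                 elif state[i+k][j+k] != ' ':
--                     cnt = 0
--                     break
--             if cnt > max_cnt:
--                 max_cnt = cnt
--     #check / diagonal counts
--     for i in range(2):
--         for j in range(2):
--             cnt = 0
--             for k in range(4):
--                 if state[i+k][j+3-k] == piece:
--                     cnt += 1
--                 elif state[i+k][j+3-k] != ' ':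
--                     cnt = 0
--                     break
--             if cnt > max_cnt:
--                 max_cnt = cnt
--     #check box counts
--     box_x = [0, 0, 1, 1]
--     box_y = [0, 1, 0, 1]
--     for i in range(4):
--         for j in range(4):
--             cnt = 0
--             for k in range(4):
--                 if state[i+box_x[k]][j+box_y[k]] == piece:
--                     cnt += 1
--                 elif state[i+box_x[k]][j+box_y[k]] != ' ':
--                     cnt = 0
--                     break
--             if cnt > max_cnt:
--                 max_cnt = cnt
--     return max_cnt
-- ===== SOURCE B (Python) =====
-- def count(state, piece):
--     """ Counts the number of pieces of a certain color on the board.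
--     Re-implementation: encode cells numerically (+1 = piece, 0 = empty,
--     -100 = opponent), build per-row and per-column prefix-sum tables, read
--     every straight 4-window as a prefix difference (diagonals as direct
--     4-term sums) and every 2x2 box as two 2-windows of the row prefixes,
--     then clamp once at the end: a window containing an opponent has a
--     negative sum, so the answer is max(0, largest window sum)."""
--     def val(c):
--         return 1 if c == piece else (0 if c == ' ' else -100)
--
--     grid = [[val(c) for c in row] for row in state]
--     # per-row prefix sums (used for the horizontal windows and the 2x2 boxes)
--     pres = []
--     for g in grid:
--         pre = [0]
--         for v in g:
--             pre.append(pre[-1] + v)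
--         pres.append(pre)
--     sums = []
--     # horizontal windows: prefix differences
--     for pre in pres:
--         for i in range(2):
--             sums.append(pre[i + 4] - pre[i])
--     # vertical windows: per-column prefix sums down the first 5 rows
--     colpre = [[0] * 5]
--     for r in range(5):
--         colpre.append([colpre[r][c] + grid[r][c] for c in range(5)])
--     for c in range(5):
--         for i in range(2):
--             sums.append(colpre[i + 4][c] - colpre[i][c])
--     # diagonal windows (\ then /): direct 4-term sums
--     for i in range(2):
--         for j in range(2):
--             sums.append(sum(grid[i + k][j + k] for k in range(4)))
--     for i in range(2):
--         for j in range(2):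
--             sums.append(sum(grid[i + k][j + 3 - k] for k in range(4)))
--     # 2x2 boxes: two horizontal 2-windows read off the row prefix tables
--     for i in range(4):
--         for j in range(4):
--             sums.append(pres[i][j + 2] - pres[i][j] + pres[i + 1][j + 2] - pres[i + 1][j])
--     return max(0, max(sums))
-- ===== Notes on version B (the rewrite author's own statement) =====
-- stated objective: alternative
-- what changed: Replaces the five break-and-reset counting loops by a numeric encoding of the board (+1 piece, 0 empty, -100 opponent) with per-row and per-column prefix-sum tables: straight 4-windows are prefix differences, 2x2 boxes are pairs of 2-windows of the row prefixes, and one final clamp max(0, largest sum) replaces the per-window opponent break.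
import Mathlib
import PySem

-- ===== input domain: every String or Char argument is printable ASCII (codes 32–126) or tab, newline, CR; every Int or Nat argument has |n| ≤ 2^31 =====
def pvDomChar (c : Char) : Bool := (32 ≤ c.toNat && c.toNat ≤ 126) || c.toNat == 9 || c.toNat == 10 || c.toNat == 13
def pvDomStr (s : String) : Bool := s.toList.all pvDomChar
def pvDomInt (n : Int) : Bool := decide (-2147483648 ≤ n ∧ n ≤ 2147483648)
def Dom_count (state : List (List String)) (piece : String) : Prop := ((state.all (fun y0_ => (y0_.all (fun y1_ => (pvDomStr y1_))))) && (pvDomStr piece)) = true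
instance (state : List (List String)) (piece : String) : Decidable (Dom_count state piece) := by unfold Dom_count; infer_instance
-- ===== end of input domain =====

-- B replaces A's five inline break-and-reset counting loops by a numeric board encoding
-- (+1 piece, 0 empty, -100 opponent) with per-row/per-column prefix-sum tables: straight
-- windows are prefix differences, boxes pairs of 2-windows of the row prefixes, and a single
-- final clamp max(0, largest sum) replaces the per-window opponent break; same cost.
set_option maxHeartbeats 1000000


-- ===== PORT A =====
-- cell access: Python state[r][c] / row[c]; the "" / [] defaults are unreachable under
-- Pre_count (every index A uses is then in range), so this equals pyGet? there.
def pvCell (state : List (List String)) (r c : Int) : String :=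
  PySem.List.pyGetD (PySem.List.pyGetD state r []) c ""

-- A's inner 'for j in …: if == piece: cnt += 1; elif != " ": cnt = 0; break' loop,
-- over the list of indices, reading cells through g.
def pvScanA (g : Int → String) (piece : String) : List Int → Int → Int
  | [], cnt => cnt
  | j :: js, cnt =>
    if g j = piece then pvScanA g piece js (cnt + 1)
    else if g j ≠ " " then 0
    else pvScanA g piece js cnt

def count (state : List (List String)) (piece : String) : Int :=
  -- horizontal
  let m1 : Int := state.foldl (fun m row =>
    (PySem.List.pyRange 0 2).foldl (fun m i =>
      let cnt := pvScanA (fun j => PySem.List.pyGetD row (i + j) "") piece (PySem.List.pyRange 0 4) 0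
      if cnt > m then cnt else m) m) 0
  -- vertical
  let m2 : Int := (PySem.List.pyRange 0 5).foldl (fun m col =>
    (PySem.List.pyRange 0 2).foldl (fun m i =>
      let cnt := pvScanA (fun j => pvCell state (i + j) col) piece (PySem.List.pyRange 0 4) 0
      if cnt > m then cnt else m) m) m1
  -- \ diagonal
  let m3 : Int := (PySem.List.pyRange 0 2).foldl (fun m i =>
    (PySem.List.pyRange 0 2).foldl (fun m j =>
      let cnt := pvScanA (fun k => pvCell state (i + k) (j + k)) piece (PySem.List.pyRange 0 4) 0
      if cnt > m then cnt else m) m) m2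
  -- / diagonal
  let m4 : Int := (PySem.List.pyRange 0 2).foldl (fun m i =>
    (PySem.List.pyRange 0 2).foldl (fun m j =>
      let cnt := pvScanA (fun k => pvCell state (i + k) (j + 3 - k)) piece (PySem.List.pyRange 0 4) 0
      if cnt > m then cnt else m) m) m3
  -- boxes
  let boxX : List Int := [0, 0, 1, 1]
  let boxY : List Int := [0, 1, 0, 1]
  let m5 : Int := (PySem.List.pyRange 0 4).foldl (fun m i =>
    (PySem.List.pyRange 0 4).foldl (fun m j =>
      let cnt := pvScanA
        (fun k => pvCell state (i + PySem.List.pyGetD boxX k 0) (j + PySem.List.pyGetD boxY k 0))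
        piece (PySem.List.pyRange 0 4) 0
      if cnt > m then cnt else m) m) m4
  m5

-- ===== PORT B =====
-- B's numeric cell encoding: +1 = piece, 0 = empty, -100 = opponent
def pvVal (piece c : String) : Int := if c = piece then 1 else if c = " " then 0 else -100

-- pre.append(pre[-1] + v)
def pvPush (pre : List Int) (v : Int) : List Int :=
  pre ++ [PySem.List.pyGetD pre (-1) 0 + v]

-- table[r][c]; the 0/[] defaults are unreachable under Pre_count (reads in range)
def pvGrid (t : List (List Int)) (r c : Int) : Int :=
  PySem.List.pyGetD (PySem.List.pyGetD t r []) c 0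

-- Source B's `sums` list, built exactly as Source B builds it (helper of the port)
def pvSumsB (state : List (List String)) (piece : String) : List Int :=
  let grid : List (List Int) := state.map (fun row => row.map (pvVal piece))
  -- per-row prefix sums (for the horizontal windows and the 2x2 boxes)
  let pres : List (List Int) := grid.foldl (fun ps g => ps ++ [g.foldl pvPush [0]]) []
  -- horizontal windows: prefix differences
  let sums1 : List Int := pres.flatMap (fun pre =>
    (PySem.List.pyRange 0 2).map (fun i =>
      PySem.List.pyGetD pre (i + 4) 0 - PySem.List.pyGetD pre i 0))
  -- vertical windows: per-column prefix sums down the first 5 rows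
  let colpre : List (List Int) := (PySem.List.pyRange 0 5).foldl (fun cp r =>
    cp ++ [(PySem.List.pyRange 0 5).map (fun c =>
      PySem.List.pyGetD (PySem.List.pyGetD cp r []) c 0 + pvGrid grid r c)]) [[0, 0, 0, 0, 0]]
  let sums2 : List Int := sums1 ++ (PySem.List.pyRange 0 5).flatMap (fun c =>
    (PySem.List.pyRange 0 2).map (fun i => pvGrid colpre (i + 4) c - pvGrid colpre i c))
  -- diagonal windows (\ then /): direct 4-term sums
  let sums3 : List Int := sums2 ++ (PySem.List.pyRange 0 2).flatMap (fun i =>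
    (PySem.List.pyRange 0 2).map (fun j =>
      ((PySem.List.pyRange 0 4).map (fun k => pvGrid grid (i + k) (j + k))).sum))
  let sums4 : List Int := sums3 ++ (PySem.List.pyRange 0 2).flatMap (fun i =>
    (PySem.List.pyRange 0 2).map (fun j =>
      ((PySem.List.pyRange 0 4).map (fun k => pvGrid grid (i + k) (j + 3 - k))).sum))
  -- 2x2 boxes: two horizontal 2-windows read off the row prefix tables
  sums4 ++ (PySem.List.pyRange 0 4).flatMap (fun i =>
    (PySem.List.pyRange 0 4).map (fun j =>
      pvGrid pres i (j + 2) - pvGrid pres i j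
        + pvGrid pres (i + 1) (j + 2) - pvGrid pres (i + 1) j))

def count_alt (state : List (List String)) (piece : String) : Int :=
  max 0 (PySem.List.maxD (pvSumsB state piece) (fun s => s) 0)

-- ===== PRECONDITION & SPEC =====
-- Pre_ excludes boards that are not at least 5x5 (fewer than 5 rows, or some row shorter
-- than 5 cells): on almost all of them Python A raises IndexError; on the rare ones where
-- every scan is cut short of a missing cell by an earlier opponent cell A returns only by
-- accident of the break order, and B raises IndexError there.
def Pre_count (state : List (List String)) (piece : String) : Prop :=
  5 ≤ state.length ∧ ∀ row ∈ state, 5 ≤ row.length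
instance (state : List (List String)) (piece : String) : Decidable (Pre_count state piece) := by
  unfold Pre_count; infer_instance

def pvWitness_count : List (List String) × String :=
  ([[" ", " ", " ", " ", " "], [" ", "b", " ", " ", " "], [" ", " ", "b", " ", " "],
    [" ", " ", " ", "r", " "], [" ", " ", " ", " ", " "]], "b")

def Spec_count (state : List (List String)) (piece : String) (out : Int) : Prop := out = count_alt state piece
instance (state : List (List String)) (piece : String) (out : Int) : Decidable (Spec_count state piece out) := by unfold Spec_count; infer_instance

-- ===== CLAIM (what is proved, stated in full; the proofs are below) =====
def Claim_equal_count : Prop := ∀ (state : List (List String)) (piece : String), Dom_count state piece → Pre_count state piece → Spec_count state piece (count state piece)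

-- ===== LEMMAS AND PROOFS =====

-- the list of all window sums, in A's scan order, read through A's cell accesses
def pvWin (state : List (List String)) (piece : String) : List Int :=
  ((((state.flatMap (fun row =>
    (PySem.List.pyRange 0 2).map (fun i =>
      ((PySem.List.pyRange 0 4).map (fun j => pvVal piece (PySem.List.pyGetD row (i + j) ""))).sum)))
  ++ (PySem.List.pyRange 0 5).flatMap (fun col =>
    (PySem.List.pyRange 0 2).map (fun i =>
      ((PySem.List.pyRange 0 4).map (fun j => pvVal piece (pvCell state (i + j) col))).sum)))
  ++ (PySem.List.pyRange 0 2).flatMap (fun i => (PySem.List.pyRange 0 2).map (fun j =>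
      ((PySem.List.pyRange 0 4).map (fun k => pvVal piece (pvCell state (i + k) (j + k)))).sum)))
  ++ (PySem.List.pyRange 0 2).flatMap (fun i => (PySem.List.pyRange 0 2).map (fun j =>
      ((PySem.List.pyRange 0 4).map (fun k => pvVal piece (pvCell state (i + k) (j + 3 - k)))).sum)))
  ++ (PySem.List.pyRange 0 4).flatMap (fun i => (PySem.List.pyRange 0 4).map (fun j =>
      ((PySem.List.pyRange 0 4).map (fun k =>
        pvVal piece (pvCell state (i + PySem.List.pyGetD [0, 0, 1, 1] k 0)
                                  (j + PySem.List.pyGetD [0, 1, 0, 1] k 0)))).sum))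

-- ---- A-side: the break-and-reset scan of a 4-window is the clamped value sum ----

lemma pvScanA_eq (g : Int → String) (p : String) :
    ∀ (js : List Int) (cnt : Int),
      pvScanA g p js cnt =
        if (js.map g).any (fun c => c != p && c != " ") then 0
        else cnt + ((PySem.List.count (js.map g) p : Nat) : Int) := by
  intro js
  induction js with
  | nil => intro cnt; simp [pvScanA, PySem.List.count]
  | cons j t ih =>
    intro cnt
    by_cases h1 : g j = p
    · simp [pvScanA, h1, ih, PySem.List.count]
      split_ifs
      · rfl
      · omega
    · by_cases h2 : g j = " "
      · simp [pvScanA, h2, ih, PySem.List.count, List.count_cons, bne]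
        split_ifs <;> simp_all
      · simp [pvScanA, h1, h2, bne]

lemma sum_val_no_opp (p : String) :
    ∀ l : List String, (l.any (fun c => c != p && c != " ") = false) →
      (l.map (pvVal p)).sum = ((PySem.List.count l p : Nat) : Int) := by
  intro l
  induction l with
  | nil => simp [PySem.List.count]
  | cons c t ih =>
    intro h
    simp only [List.any_cons, Bool.or_eq_false_iff, bne, Bool.and_eq_false_iff,
      Bool.not_eq_false', beq_iff_eq] at h
    obtain ⟨h1, h2⟩ := h
    have ht := ih h2
    simp only [PySem.List.count_eq] at ht ⊢
    by_cases hc : c = p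
    · subst hc
      simp only [List.map_cons, List.sum_cons, List.count_cons_self, pvVal, if_pos rfl]
      push_cast; omega
    · have hsp : c = " " := by tauto
      subst hsp
      simp only [List.map_cons, List.sum_cons, List.count_cons, pvVal, if_neg hc, beq_iff_eq]
      simp [ht]

lemma sum_val_le (p : String) : ∀ l : List String, (l.map (pvVal p)).sum ≤ l.length := by
  intro l
  induction l with
  | nil => simp
  | cons c t ih =>
    simp only [List.map_cons, List.sum_cons, List.length_cons]
    have : pvVal p c ≤ 1 := by unfold pvVal; split_ifs <;> omega
    push_cast; omega

lemma sum_val_opp (p : String) :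
    ∀ l : List String, (l.any (fun c => c != p && c != " ") = true) →
      (l.map (pvVal p)).sum ≤ (l.length : Int) - 101 := by
  intro l
  induction l with
  | nil => simp
  | cons c t ih =>
    intro h
    simp only [List.any_cons, Bool.or_eq_true, bne, Bool.and_eq_true, Bool.not_eq_eq_eq_not,
      Bool.not_true, beq_eq_false_iff_ne] at h
    simp only [List.map_cons, List.sum_cons, List.length_cons]
    have hle := sum_val_le p t
    have hv : pvVal p c ≤ 1 := by unfold pvVal; split_ifs <;> omega
    rcases h with ⟨h1, h2⟩ | h
    · have : pvVal p c = -100 := by simp [pvVal, h1, h2]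
      push_cast; omega
    · have := ih (by simpa using h)
      push_cast; omega

lemma pvScanA_maxsum (g : Int → String) (p : String) :
    pvScanA g p (PySem.List.pyRange 0 4) 0 =
      max 0 (((PySem.List.pyRange 0 4).map (fun k => pvVal p (g k))).sum) := by
  rw [pvScanA_eq]
  have hm : (PySem.List.pyRange 0 4).map (fun k => pvVal p (g k)) =
      ((PySem.List.pyRange 0 4).map g).map (pvVal p) := by simp [Function.comp]
  rw [hm]
  set l := (PySem.List.pyRange 0 4).map g with hl
  have hlen : l.length = 4 := by simp [hl]
  by_cases h : l.any (fun c => c != p && c != " ")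
  · have := sum_val_opp p l h
    rw [if_pos h]
    omega
  · have := sum_val_no_opp p l (by simpa using h)
    rw [if_neg h, this]
    omega

lemma ite_gt_eq_max (m c : Int) : (if c > m then c else m) = max m c := by
  split_ifs <;> omega

-- count as a clamped fold over the window-sum list
lemma count_eq_fold (state : List (List String)) (piece : String) :
    count state piece = (pvWin state piece).foldl (fun m s => max m (max 0 s)) 0 := by
  unfold count pvWin
  simp only [List.foldl_append, List.foldl_flatMap, List.foldl_map, pvScanA_maxsum, ite_gt_eq_max]

-- the clamp in the fold body can move to the initial 0
lemma foldl_clamp : ∀ (l : List Int) (m : Int), 0 ≤ m →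
    l.foldl (fun m s => max m (max 0 s)) m = l.foldl max m := by
  intro l
  induction l with
  | nil => intro m _; rfl
  | cons s t ih =>
    intro m hm
    simp only [List.foldl_cons]
    have h1 : max m (max 0 s) = max m s := by omega
    rw [h1, ih _ (by omega)]

def pvPre (g : List Int) : List Int := g.foldl pvPush [0]

def pvTail (x : Int) : List Int → List Int
  | [] => []
  | v :: vs => (x + v) :: pvTail (x + v) vs

lemma pvPush_append (l : List Int) (x v : Int) : pvPush (l ++ [x]) v = l ++ [x, x + v] := by
  simp [pvPush, PySem.List.pyGetD_neg_one_append_singleton]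

lemma foldl_push (g : List Int) : ∀ (l : List Int) (x : Int),
    g.foldl pvPush (l ++ [x]) = l ++ x :: pvTail x g := by
  induction g with
  | nil => intro l x; simp [pvTail]
  | cons v vs ih =>
    intro l x
    simp only [List.foldl_cons, pvPush_append]
    rw [show l ++ [x, x + v] = (l ++ [x]) ++ [x + v] by simp]
    rw [ih]
    simp [pvTail]

lemma pvTail_getD (g : List Int) : ∀ (x : Int) (k : ℕ), k < g.length →
    (pvTail x g).getD k 0 = x + (g.take (k + 1)).sum := by
  induction g with
  | nil => intro x k h; simp at h
  | cons v vs ih =>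
    intro x k h
    cases k with
    | zero => simp [pvTail]
    | succ j =>
      simp only [pvTail, List.getD_cons_succ, List.take_succ_cons, List.sum_cons]
      rw [ih (x + v) j (by simpa using h)]
      ring

lemma pre_getD (g : List Int) (k : ℕ) (hk : k ≤ g.length) :
    PySem.List.pyGetD (pvPre g) (k : Int) 0 = (g.take k).sum := by
  have h1 : pvPre g = 0 :: pvTail 0 g := by
    have := foldl_push g [] 0
    simpa [pvPre] using this
  rw [h1, PySem.List.pyGetD_natCast]
  cases k with
  | zero => simp
  | succ j =>
    simp only [List.getD_cons_succ]
    rw [pvTail_getD g 0 j (by omega)]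
    simp

lemma win_eq (p : String) (row : List String) (i w : ℕ) (h : i + w ≤ row.length) :
    (((row.map (pvVal p)).drop i).take w).sum
      = ((PySem.List.pyRange 0 (w : Int)).map
          (fun j => pvVal p (PySem.List.pyGetD row ((i : Int) + j) ""))).sum := by
  induction w with
  | zero => simp [PySem.List.pyRange_one_eq_nil]
  | succ n ih =>
    rw [show ((n + 1 : ℕ) : Int) = (n : Int) + 1 by push_cast; ring]
    rw [PySem.List.pyRange_one_succ_right (by positivity)]
    rw [List.map_append, List.sum_append, ← ih (by omega)]
    rw [List.take_succ]
    have hidx : i + n < row.length := by omega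
    have h2 : ((row.map (pvVal p)).drop i)[n]? = some (pvVal p row[i + n]) := by
      rw [List.getElem?_drop]
      rw [List.getElem?_map]
      simp [List.getElem?_eq_getElem hidx]
    have h3 : PySem.List.pyGetD row ((i : Int) + (n : Int)) "" = row[i + n] := by
      rw [show ((i : Int) + (n : Int)) = ((i + n : ℕ) : Int) by push_cast; ring]
      rw [PySem.List.pyGetD_natCast]
      exact List.getD_eq_getElem _ _ hidx
    simp [h2, h3]

lemma pre_diff (g : List Int) (i w : ℕ) (h : i + w ≤ g.length) :
    (g.take (i + w)).sum - (g.take i).sum = ((g.drop i).take w).sum := by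
  rw [show i + w = i + w from rfl, List.take_add, List.sum_append]
  ring

lemma grid_cell5 (p : String) (state : List (List String)) (hs : 5 ≤ state.length)
    (hrows : ∀ row ∈ state, 5 ≤ row.length) (r c : Int)
    (hr : 0 ≤ r) (hr5 : r < 5) (hc : 0 ≤ c) (hc5 : c < 5) :
    pvGrid (state.map (fun row => row.map (pvVal p))) r c = pvVal p (pvCell state r c) := by
  have hrlen : r < (state.length : Int) := by omega
  have hrow : state[r.toNat]'(by omega) ∈ state := List.getElem_mem _
  have hclen : c < ((state[r.toNat]'(by omega)).length : Int) := by
    have := hrows _ hrow; omega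
  unfold pvGrid pvCell
  rw [PySem.List.pyGetD_eq_getElem state [] hr (by simpa using hrlen)]
  rw [PySem.List.pyGetD_eq_getElem (state.map (fun row => row.map (pvVal p))) [] hr
    (by simpa using hrlen)]
  rw [List.getElem_map]
  rw [PySem.List.pyGetD_eq_getElem _ "" hc (by simpa using hclen)]
  rw [PySem.List.pyGetD_eq_getElem _ (0 : Int) hc (by simpa using hclen)]
  rw [List.getElem_map]

-- the colpre fold builds partial column sums
lemma colpre_inv (grid : List (List Int)) : ∀ (n : ℕ), n ≤ 5 →
    ((PySem.List.pyRange 0 (n : Int)).foldl (fun cp r =>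
        cp ++ [(PySem.List.pyRange 0 5).map (fun c =>
          PySem.List.pyGetD (PySem.List.pyGetD cp r []) c 0 + pvGrid grid r c)]) [[0,0,0,0,0]]).length = n + 1 ∧
    ∀ (r c : ℕ), r ≤ n → c < 5 →
      pvGrid ((PySem.List.pyRange 0 (n : Int)).foldl (fun cp r =>
        cp ++ [(PySem.List.pyRange 0 5).map (fun c =>
          PySem.List.pyGetD (PySem.List.pyGetD cp r []) c 0 + pvGrid grid r c)]) [[0,0,0,0,0]]) r c
        = ((List.range r).map (fun k => pvGrid grid (k : Int) (c : Int))).sum := by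
  intro n
  induction n with
  | zero =>
    intro _
    have h0 : PySem.List.pyRange 0 ((0 : ℕ) : Int) = [] := by
      norm_num [PySem.List.pyRange_one_eq_nil]
    constructor
    · simp [h0]
    · intro r c hr hc
      interval_cases r
      simp only [h0, List.foldl_nil, List.range_zero, List.map_nil, List.sum_nil, pvGrid]
      rw [show ((0 : ℕ) : Int) = 0 by norm_num, PySem.List.pyGetD_zero_cons]
      rw [PySem.List.pyGetD_natCast]
      interval_cases c <;> rfl
  | succ m ih =>
    intro hm
    obtain ⟨ihlen, ihval⟩ := ih (by omega)
    have hsplit : PySem.List.pyRange 0 ((m + 1 : ℕ) : Int)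
        = PySem.List.pyRange 0 (m : Int) ++ [(m : Int)] := by
      rw [show ((m + 1 : ℕ) : Int) = (m : Int) + 1 by push_cast; ring]
      exact PySem.List.pyRange_one_succ_right (by positivity)
    rw [hsplit, List.foldl_append]
    set cp := (PySem.List.pyRange 0 (m : Int)).foldl (fun cp r =>
        cp ++ [(PySem.List.pyRange 0 5).map (fun c =>
          PySem.List.pyGetD (PySem.List.pyGetD cp r []) c 0 + pvGrid grid r c)]) [[0,0,0,0,0]] with hcp
    simp only [List.foldl_cons, List.foldl_nil]
    constructor
    · simp [ihlen]
    · intro r c hr hc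
      unfold pvGrid
      rw [PySem.List.pyGetD_natCast (n := r)]
      by_cases hrm : r ≤ m
      · have hrlt : r < cp.length := by omega
        rw [List.getD_append _ _ _ _ hrlt]
        have := ihval r c hrm hc
        unfold pvGrid at this
        rw [PySem.List.pyGetD_natCast cp r []] at this
        exact this
      · have hreq : r = m + 1 := by omega
        subst hreq
        have hlen : cp.length = m + 1 := ihlen
        rw [List.getD_append_right _ _ _ _ (by omega)]
        rw [hlen, Nat.sub_self, List.getD_cons_zero]
        rw [show (5 : Int) = ((5 : ℕ) : Int) by norm_num]
        rw [PySem.List.pyGetD_map_pyRange _ 5 c 0 hc]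
        have hm' := ihval m c (le_refl m) hc
        unfold pvGrid at hm'
        rw [hm']
        rw [List.range_succ]
        simp [pvGrid]

lemma pre_window (p : String) (row : List String) (h5 : 5 ≤ row.length) (i w : ℕ) (hiw : i + w ≤ 5) :
    PySem.List.pyGetD ((row.map (pvVal p)).foldl pvPush [0]) ((i + w : ℕ) : Int) 0
      - PySem.List.pyGetD ((row.map (pvVal p)).foldl pvPush [0]) ((i : ℕ) : Int) 0
      = ((PySem.List.pyRange 0 (w : Int)).map
          (fun j => pvVal p (PySem.List.pyGetD row ((i : Int) + j) ""))).sum := by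
  have hlen : i + w ≤ (row.map (pvVal p)).length := by simp; omega
  have h2 : (i : ℕ) ≤ (row.map (pvVal p)).length := by simp; omega
  rw [show ((row.map (pvVal p)).foldl pvPush [0]) = pvPre (row.map (pvVal p)) from rfl]
  rw [pre_getD _ _ hlen, pre_getD _ _ h2, pre_diff _ _ _ hlen]
  exact win_eq p row i w (by simp at hlen; omega)

lemma pre_window' (p : String) (row : List String) (h5 : 5 ≤ row.length) (i : Int) (w : ℕ)
    (hi : 0 ≤ i) (hiw : i + w ≤ 5) :
    PySem.List.pyGetD ((row.map (pvVal p)).foldl pvPush [0]) (i + (w : Int)) 0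
      - PySem.List.pyGetD ((row.map (pvVal p)).foldl pvPush [0]) i 0
      = ((PySem.List.pyRange 0 (w : Int)).map
          (fun j => pvVal p (PySem.List.pyGetD row (i + j) ""))).sum := by
  obtain ⟨k, rfl⟩ := Int.eq_ofNat_of_zero_le hi
  rw [show ((k : Int) + (w : Int)) = ((k + w : ℕ) : Int) by push_cast; ring]
  exact pre_window p row h5 k w (by omega)

lemma horiz_eq (p : String) (state : List (List String))
    (hrows : ∀ row ∈ state, 5 ≤ row.length) :
    ((state.map (fun row => row.map (pvVal p))).foldl (fun ps g => ps ++ [g.foldl pvPush [0]]) []).flatMap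
        (fun pre => (PySem.List.pyRange 0 2).map (fun i =>
          PySem.List.pyGetD pre (i + 4) 0 - PySem.List.pyGetD pre i 0))
      = state.flatMap (fun row => (PySem.List.pyRange 0 2).map (fun i =>
          ((PySem.List.pyRange 0 4).map (fun j => pvVal p (PySem.List.pyGetD row (i + j) ""))).sum)) := by
  rw [PySem.List.foldl_append_singleton_eq_map, List.nil_append, List.flatMap_map,
    List.flatMap_map]
  apply List.flatMap_congr
  intro row hrow
  have h5 := hrows row hrow
  have hr2 : PySem.List.pyRange 0 2 = [0, 1] := rfl
  have E0 := pre_window' p row h5 0 4 (by norm_num) (by norm_num)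
  have E1 := pre_window' p row h5 1 4 (by norm_num) (by norm_num)
  simp only [hr2, List.map_cons, List.map_nil]
  norm_num at E0 E1 ⊢
  rw [E0, E1]
  exact ⟨rfl, rfl⟩

lemma vert_eq (p : String) (state : List (List String)) (hs : 5 ≤ state.length)
    (hrows : ∀ row ∈ state, 5 ≤ row.length) :
    (PySem.List.pyRange 0 5).flatMap (fun c => (PySem.List.pyRange 0 2).map (fun i =>
        pvGrid ((PySem.List.pyRange 0 5).foldl (fun cp r =>
          cp ++ [(PySem.List.pyRange 0 5).map (fun c =>
            PySem.List.pyGetD (PySem.List.pyGetD cp r []) c 0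
              + pvGrid (state.map (fun row => row.map (pvVal p))) r c)]) [[0,0,0,0,0]]) (i + 4) c
        - pvGrid ((PySem.List.pyRange 0 5).foldl (fun cp r =>
          cp ++ [(PySem.List.pyRange 0 5).map (fun c =>
            PySem.List.pyGetD (PySem.List.pyGetD cp r []) c 0
              + pvGrid (state.map (fun row => row.map (pvVal p))) r c)]) [[0,0,0,0,0]]) i c))
      = (PySem.List.pyRange 0 5).flatMap (fun col => (PySem.List.pyRange 0 2).map (fun i =>
          ((PySem.List.pyRange 0 4).map (fun j => pvVal p (pvCell state (i + j) col))).sum)) := by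
  have hcast : ((5 : ℕ) : Int) = (5 : Int) := by norm_num
  obtain ⟨hlen5, hval5⟩ := colpre_inv (state.map (fun row => row.map (pvVal p))) 5 (le_refl 5)
  rw [hcast] at hval5
  apply List.flatMap_congr
  intro c hc
  rw [PySem.List.mem_pyRange_one] at hc
  obtain ⟨cn, rfl⟩ := Int.eq_ofNat_of_zero_le hc.1
  have hcn : cn < 5 := by exact_mod_cast hc.2
  have hr2 : PySem.List.pyRange 0 2 = [0, 1] := rfl
  have h4 : PySem.List.pyRange 0 4 = [0, 1, 2, 3] := rfl
  have V0 := hval5 0 cn (by omega) hcn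
  have V1 := hval5 1 cn (by omega) hcn
  have V4 := hval5 4 cn (by omega) hcn
  have V5 := hval5 5 cn (by omega) hcn
  have G : ∀ (k : Int), 0 ≤ k → k < 5 →
      pvGrid (state.map (fun row => row.map (pvVal p))) k (cn : Int)
        = pvVal p (pvCell state k (cn : Int)) :=
    fun k hk hk5 => grid_cell5 p state hs hrows k _ hk hk5 (by positivity) (by exact_mod_cast hcn)
  have hrg : List.range 4 = [0, 1, 2, 3] := rfl
  have hrg5 : List.range 5 = [0, 1, 2, 3, 4] := rfl
  have hrg1 : List.range 1 = [0] := rfl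
  simp only [hr2, h4, List.map_cons, List.map_nil, List.sum_cons, List.sum_nil]
  norm_num at V0 V1 V4 V5 ⊢
  rw [V4, V0, V1, V5]
  simp only [hrg, hrg5, hrg1, List.map_cons, List.map_nil, List.sum_cons, List.sum_nil]
  norm_num
  rw [G 0 (by norm_num) (by norm_num), G 1 (by norm_num) (by norm_num),
    G 2 (by norm_num) (by norm_num), G 3 (by norm_num) (by norm_num),
    G 4 (by norm_num) (by norm_num)]
  constructor <;> ring

lemma diag1_eq (p : String) (state : List (List String)) (hs : 5 ≤ state.length)
    (hrows : ∀ row ∈ state, 5 ≤ row.length) :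
    (PySem.List.pyRange 0 2).flatMap (fun i => (PySem.List.pyRange 0 2).map (fun j =>
        ((PySem.List.pyRange 0 4).map (fun k =>
          pvGrid (state.map (fun row => row.map (pvVal p))) (i + k) (j + k))).sum))
      = (PySem.List.pyRange 0 2).flatMap (fun i => (PySem.List.pyRange 0 2).map (fun j =>
          ((PySem.List.pyRange 0 4).map (fun k => pvVal p (pvCell state (i + k) (j + k)))).sum)) := by
  apply List.flatMap_congr
  intro i hi
  rw [PySem.List.mem_pyRange_one] at hi
  apply List.map_congr_left
  intro j hj
  rw [PySem.List.mem_pyRange_one] at hj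
  congr 1
  apply List.map_congr_left
  intro k hk
  rw [PySem.List.mem_pyRange_one] at hk
  exact grid_cell5 p state hs hrows _ _ (by omega) (by omega) (by omega) (by omega)

lemma diag2_eq (p : String) (state : List (List String)) (hs : 5 ≤ state.length)
    (hrows : ∀ row ∈ state, 5 ≤ row.length) :
    (PySem.List.pyRange 0 2).flatMap (fun i => (PySem.List.pyRange 0 2).map (fun j =>
        ((PySem.List.pyRange 0 4).map (fun k =>
          pvGrid (state.map (fun row => row.map (pvVal p))) (i + k) (j + 3 - k))).sum))
      = (PySem.List.pyRange 0 2).flatMap (fun i => (PySem.List.pyRange 0 2).map (fun j =>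
          ((PySem.List.pyRange 0 4).map (fun k => pvVal p (pvCell state (i + k) (j + 3 - k)))).sum)) := by
  apply List.flatMap_congr
  intro i hi
  rw [PySem.List.mem_pyRange_one] at hi
  apply List.map_congr_left
  intro j hj
  rw [PySem.List.mem_pyRange_one] at hj
  congr 1
  apply List.map_congr_left
  intro k hk
  rw [PySem.List.mem_pyRange_one] at hk
  exact grid_cell5 p state hs hrows _ _ (by omega) (by omega) (by omega) (by omega)

lemma cell_row (state : List (List String)) (a : Int) (ha : 0 ≤ a) (ha5 : a < (state.length : Int)) (b : Int) :
    pvCell state a b = PySem.List.pyGetD (state[a.toNat]'(by omega)) b "" := by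
  unfold pvCell
  rw [PySem.List.pyGetD_eq_getElem state [] ha (by exact_mod_cast ha5)]

lemma box_eq (p : String) (state : List (List String)) (hs : 5 ≤ state.length)
    (hrows : ∀ row ∈ state, 5 ≤ row.length) :
    (PySem.List.pyRange 0 4).flatMap (fun i => (PySem.List.pyRange 0 4).map (fun j =>
        pvGrid ((state.map (fun row => row.map (pvVal p))).foldl
            (fun ps g => ps ++ [g.foldl pvPush [0]]) []) i (j + 2)
          - pvGrid ((state.map (fun row => row.map (pvVal p))).foldl
            (fun ps g => ps ++ [g.foldl pvPush [0]]) []) i j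
          + pvGrid ((state.map (fun row => row.map (pvVal p))).foldl
            (fun ps g => ps ++ [g.foldl pvPush [0]]) []) (i + 1) (j + 2)
          - pvGrid ((state.map (fun row => row.map (pvVal p))).foldl
            (fun ps g => ps ++ [g.foldl pvPush [0]]) []) (i + 1) j))
      = (PySem.List.pyRange 0 4).flatMap (fun i => (PySem.List.pyRange 0 4).map (fun j =>
          ((PySem.List.pyRange 0 4).map (fun k =>
            pvVal p (pvCell state (i + PySem.List.pyGetD [0, 0, 1, 1] k 0)
                                  (j + PySem.List.pyGetD [0, 1, 0, 1] k 0)))).sum)) := by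
  rw [PySem.List.foldl_append_singleton_eq_map, List.nil_append, List.map_map]
  simp only [Function.comp_def]
  apply List.flatMap_congr
  intro i hi
  rw [PySem.List.mem_pyRange_one] at hi
  apply List.map_congr_left
  intro j hj
  rw [PySem.List.mem_pyRange_one] at hj
  -- the two rows touched by this box
  have hi1 : i.toNat < state.length := by omega
  have hi2 : (i + 1).toNat < state.length := by omega
  have hrowat : ∀ (a : Int) (ha : 0 ≤ a) (ha5 : a.toNat < state.length),
      PySem.List.pyGetD (state.map (fun row => (row.map (pvVal p)).foldl pvPush [0])) a []
        = ((state[a.toNat]'ha5).map (pvVal p)).foldl pvPush [0] := by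
    intro a ha ha5
    rw [PySem.List.pyGetD_eq_getElem _ [] ha (by simp only [List.length_map]; omega)]
    rw [List.getElem_map]
  unfold pvGrid
  rw [hrowat i (by omega) hi1, hrowat (i + 1) (by omega) hi2]
  have h5a : 5 ≤ (state[i.toNat]'hi1).length := hrows _ (List.getElem_mem _)
  have h5b : 5 ≤ (state[(i + 1).toNat]'hi2).length := hrows _ (List.getElem_mem _)
  have W1 := pre_window' p _ h5a j 2 (by omega) (by omega)
  have W2 := pre_window' p _ h5b j 2 (by omega) (by omega)
  have hr2 : PySem.List.pyRange 0 ((2 : ℕ) : Int) = [0, 1] := rfl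
  rw [hr2] at W1 W2
  norm_num at W1 W2
  have hre : ∀ (A B C D : Int), A - B + C - D = (A - B) + (C - D) := by intro A B C D; ring
  rw [hre]
  rw [W1, W2]
  -- right-hand side: expand the box pattern
  have h4 : PySem.List.pyRange 0 4 = [0, 1, 2, 3] := rfl
  simp only [h4, List.map_cons, List.map_nil, List.sum_cons, List.sum_nil]
  have hx0 : PySem.List.pyGetD [(0 : Int), 0, 1, 1] 0 0 = 0 := rfl
  have hx1 : PySem.List.pyGetD [(0 : Int), 0, 1, 1] 1 0 = 0 := rfl
  have hx2 : PySem.List.pyGetD [(0 : Int), 0, 1, 1] 2 0 = 1 := rfl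
  have hx3 : PySem.List.pyGetD [(0 : Int), 0, 1, 1] 3 0 = 1 := rfl
  have hy0 : PySem.List.pyGetD [(0 : Int), 1, 0, 1] 0 0 = 0 := rfl
  have hy1 : PySem.List.pyGetD [(0 : Int), 1, 0, 1] 1 0 = 1 := rfl
  have hy2 : PySem.List.pyGetD [(0 : Int), 1, 0, 1] 2 0 = 0 := rfl
  have hy3 : PySem.List.pyGetD [(0 : Int), 1, 0, 1] 3 0 = 1 := rfl
  rw [hx0, hx1, hx2, hx3, hy0, hy1, hy2, hy3]
  norm_num
  rw [cell_row state i (by omega) (by omega) j,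
    cell_row state i (by omega) (by omega) (j + 1),
    cell_row state (i + 1) (by omega) (by omega) j,
    cell_row state (i + 1) (by omega) (by omega) (j + 1)]
  ring

-- ---- assembly ----

lemma sums_eq (state : List (List String)) (p : String) (hs : 5 ≤ state.length)
    (hrows : ∀ row ∈ state, 5 ≤ row.length) :
    pvSumsB state p = pvWin state p := by
  unfold pvSumsB pvWin
  dsimp only
  rw [horiz_eq p state hrows, vert_eq p state hs hrows, diag1_eq p state hs hrows,
    diag2_eq p state hs hrows, box_eq p state hs hrows]

lemma max_foldl_pull : ∀ (t : List Int) (a b : Int), max a (t.foldl max b) = t.foldl max (max a b) := by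
  intro t
  induction t with
  | nil => intro a b; rfl
  | cons x xs ih =>
    intro a b
    simp only [List.foldl_cons]
    rw [ih, max_assoc]

lemma max0_maxD (l : List Int) (h : l ≠ []) :
    max 0 (PySem.List.maxD l (fun s => s) 0) = l.foldl max 0 := by
  cases l with
  | nil => exact absurd rfl h
  | cons x t =>
    rw [PySem.List.maxD, PySem.List.max?_id_cons]
    simp only [Option.getD_some]
    rw [max_foldl_pull, List.foldl_cons]

lemma pvWin_ne_nil (state : List (List String)) (piece : String) (hs : 5 ≤ state.length) :
    pvWin state piece ≠ [] := by
  unfold pvWin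
  rcases state with _ | ⟨r, t⟩
  · simp at hs
  · have hr2 : PySem.List.pyRange 0 2 = [0, 1] := rfl
    simp [hr2]

-- ===== VERDICT (by name: the statement is the Claim_ definition above) =====
theorem count_spec : Claim_equal_count := by
  intro state piece _ hPre
  obtain ⟨hs, hrows⟩ := hPre
  unfold Spec_count count_alt
  rw [count_eq_fold, foldl_clamp _ 0 (le_refl 0)]
  rw [sums_eq state piece hs hrows, max0_maxD _ (pvWin_ne_nil state piece hs)]
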